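-- pv_equiv track=rewrite | github.com/brinzaalina/Homeworks-and-others | Third Year/Semester 1/Public key cryptography/Lab 4/main.py | calculate_numerical_equiv
-- ===== SOURCE A (Python) =====
-- def calculate_numerical_equiv(word, size_of_block=3):
--     # calculate the numerical equivalent of a word
--     # the word is split into blocks of size 3
--     # each block is converted into a number
--     # the given word is converted into a sequence of numbers
--     letters = list(word)
--     characters = [' ', 'a', 'b', 'c', 'd', 'e', 'f', 'g', 'h', 'i', 'j', 'k', 'l', 'm', 'n', 'o', 'p', 'q', 'r', 's',
--                   't', 'u', 'v', 'w', 'x', 'y', 'z']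
--     dict = {}
--     for i in range(0, len(characters)):
--         dict[characters[i]] = i
--
--     j = 0
--     nr_equiv = []
--     while j < len(letters):
--         i = j
--         aux = 0
--         while i < len(letters) and i < j + size_of_block:
--             i += 1
--         i -= j
--         for a in range(0, i):
--             aux += pow(27, size_of_block - a - 1) * dict[letters[j + a]]
--         j += i
--         nr_equiv.append(aux)
--     return nr_equiv
-- ===== SOURCE B (Python) =====
-- def calculate_numerical_equiv(word, size_of_block=3):
--     # build the char -> index map once, then process the word chunk by chunk
--     idx = {c: i for i, c in enumerate(" abcdefghijklmnopqrstuvwxyz")}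
--     nr_equiv = []
--     for start in range(0, len(word), size_of_block):
--         chunk = word[start:start + size_of_block]
--         v = 0
--         for c in chunk:
--             v = v * 27 + idx[c]
--         nr_equiv.append(v * 27 ** (size_of_block - len(chunk)))
--     return nr_equiv
-- ===== Notes on version B (the rewrite author's own statement) =====
-- stated objective: simpler
-- what changed: B replaces A's index-juggling nested while loops (an inner dummy counting loop plus a pow(27, ...) term per character) by a single pass over range(0, len(word), size_of_block): each chunk is obtained by slicing and valued with Horner's rule, left-aligned by one final multiplication by 27**(size_of_block - len(chunk)).
-- outside the precondition, e.g. on calculate_numerical_equiv('', 0): A returns [], B raises ValueError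
import Mathlib
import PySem

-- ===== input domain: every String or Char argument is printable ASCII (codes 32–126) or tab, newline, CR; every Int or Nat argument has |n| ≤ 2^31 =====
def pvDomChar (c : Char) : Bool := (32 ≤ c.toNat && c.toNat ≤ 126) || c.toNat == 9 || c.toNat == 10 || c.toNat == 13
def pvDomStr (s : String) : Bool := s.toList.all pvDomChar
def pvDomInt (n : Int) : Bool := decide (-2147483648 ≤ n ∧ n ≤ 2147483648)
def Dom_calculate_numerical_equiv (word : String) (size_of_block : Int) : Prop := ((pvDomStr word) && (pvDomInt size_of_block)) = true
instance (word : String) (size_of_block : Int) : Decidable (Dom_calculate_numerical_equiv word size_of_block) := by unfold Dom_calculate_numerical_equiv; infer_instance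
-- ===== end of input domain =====

-- B replaces A's index-juggling nested while loops by one pass over the word in slices of
-- size_of_block, valuing each chunk by Horner's rule (objective: simpler decomposition).

-- ===== PORT A =====
def pvCharsA : List Char := [' ', 'a', 'b', 'c', 'd', 'e', 'f', 'g', 'h', 'i', 'j', 'k', 'l',
  'm', 'n', 'o', 'p', 'q', 'r', 's', 't', 'u', 'v', 'w', 'x', 'y', 'z']

-- for i in range(0, len(characters)): dict[characters[i]] = i   (index always in range here)
def pvDictA : PySem.Dict Char Int :=
  (PySem.List.pyRange 0 (pvCharsA.length : Int) 1).foldl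
    (fun d i => d.insert (PySem.List.pyGetD pvCharsA i ' ') i) PySem.Dict.empty

-- while i < len(letters) and i < j + size_of_block: i += 1
def pvInnerA (len s j i : Int) : Int :=
  if _h : i < len ∧ i < j + s then pvInnerA len s j (i + 1) else i
termination_by (len - i).toNat
decreasing_by omega

-- the outer while loop; fuel = len(letters)+1 suffices wherever the Python terminates
-- (j advances by at least 1 per iteration then; with size_of_block ≤ 0 and a nonempty word
-- the Python loops forever — such inputs are outside Pre_ below).
-- pow(27, s-a-1) is ported as 27 ^ (s-a-1).toNat and dict[letters[j+a]] via pyGetD with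
-- default ' ' / getD 0: exact on Pre_, where 0 ≤ s-a-1, the index is in range and the key present.
def pvOuterA (d : PySem.Dict Char Int) (letters : List Char) (s : Int) :
    Nat → Int → List Int → List Int
  | 0, _, acc => acc
  | fuel + 1, j, acc =>
    if j < (letters.length : Int) then
      let i := pvInnerA (letters.length : Int) s j j - j
      let aux := (PySem.List.pyRange 0 i 1).foldl
        (fun aux a =>
          aux + 27 ^ (s - a - 1).toNat * PySem.Dict.getD d (PySem.List.pyGetD letters (j + a) ' ') 0) 0
      pvOuterA d letters s fuel (j + i) (acc ++ [aux])
    else acc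

def calculate_numerical_equiv (word : String) (size_of_block : Int) : List Int :=
  pvOuterA pvDictA word.toList size_of_block (word.toList.length + 1) 0 []

-- ===== PORT B =====
-- idx = {c: i for i, c in enumerate(" abcdefghijklmnopqrstuvwxyz")}
def pvIdxB : PySem.Dict Char Int :=
  (PySem.List.enumerate " abcdefghijklmnopqrstuvwxyz".toList).foldl
    (fun d p => d.insert p.2 p.1) PySem.Dict.empty

-- for start in range(0, len(word), size_of_block): chunk = word[start:start+size_of_block]; Horner
-- (idx[c] via getD 0: the key is present on every input in Pre_; 27 ** (s - len(chunk)) has a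
-- nonnegative exponent whenever Pre_ holds, so ^ on .toNat is exact there)
def calculate_numerical_equiv_alt (word : String) (size_of_block : Int) : List Int :=
  (PySem.List.pyRange 0 (word.toList.length : Int) size_of_block).foldl
    (fun acc start =>
      let chunk := PySem.List.slice word.toList (some start) (some (start + size_of_block))
      let v := chunk.foldl (fun v c => v * 27 + PySem.Dict.getD pvIdxB c 0) 0
      acc ++ [v * 27 ^ (size_of_block - (chunk.length : Int)).toNat]) []

-- ===== PRECONDITION & SPEC =====
-- Pre_ excludes: words containing a character other than space or a lowercase ASCII letter (A raises KeyError); a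
-- size_of_block ≤ 0 with a nonempty word (A loops forever); and the corner of the empty word with
-- size_of_block = 0, where A returns [] but B's range(0, 0, 0) raises ValueError.
def Pre_calculate_numerical_equiv (word : String) (size_of_block : Int) : Prop :=
  (1 ≤ size_of_block ∨ (word = "" ∧ size_of_block < 0)) ∧
  word.toList.all (fun c => c == ' ' || ('a' ≤ c && c ≤ 'z')) = true
instance (word : String) (size_of_block : Int) : Decidable (Pre_calculate_numerical_equiv word size_of_block) := by
  unfold Pre_calculate_numerical_equiv; infer_instance
def pvWitness_calculate_numerical_equiv : String × Int := ("hello world", 3)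

def Spec_calculate_numerical_equiv (word : String) (size_of_block : Int) (out : List Int) : Prop :=
  out = calculate_numerical_equiv_alt word size_of_block
instance (word : String) (size_of_block : Int) (out : List Int) : Decidable (Spec_calculate_numerical_equiv word size_of_block out) := by
  unfold Spec_calculate_numerical_equiv; infer_instance

-- ===== CLAIM (what is proved, stated in full; the proofs are below) =====
def Claim_equal_calculate_numerical_equiv : Prop := ∀ (word : String) (size_of_block : Int), Dom_calculate_numerical_equiv word size_of_block → Pre_calculate_numerical_equiv word size_of_block → Spec_calculate_numerical_equiv word size_of_block (calculate_numerical_equiv word size_of_block)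

-- ===== LEMMAS AND PROOFS =====

-- the two ports build the same association list
theorem pv_dict_eq : pvDictA = pvIdxB := by decide

-- the inner while computes min(len, j + s)
theorem pv_inner_eq (len s j i : Int) (h1 : i ≤ len) (h2 : i ≤ j + s) :
    pvInnerA len s j i = min len (j + s) := by
  rw [pvInnerA]
  split
  · next h => exact pv_inner_eq len s j (i + 1) (by omega) (by omega)
  · next h => omega
termination_by (len - i).toNat
decreasing_by omega

-- A's indexed power sum over a chunk equals Horner's value left-aligned to sN digits
theorem pv_sum_chunk (f : Char → Int) (cs : List Char) (sN : Nat) (h : cs.length ≤ sN) :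
    (PySem.List.pyRange 0 (cs.length : Int) 1).foldl
      (fun aux a => aux + 27 ^ (((sN : Int)) - a - 1).toNat * f (PySem.List.pyGetD cs a ' ')) 0
    = (cs.foldl (fun v c => v * 27 + f c) 0) * 27 ^ (sN - cs.length) := by
  induction cs using List.reverseRecOn with
  | nil => simp [PySem.List.pyRange]
  | append_singleton cs c ih =>
    have hm : cs.length ≤ sN := by simp at h; omega
    have hcast : (((cs ++ [c]).length : Nat) : Int) = (cs.length : Int) + 1 := by
      simp
    rw [hcast, PySem.List.pyRange_one_succ_right (by positivity), List.foldl_append]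
    simp only [List.foldl_cons, List.foldl_nil]
    rw [PySem.List.foldl_congr_mem _ _
      (fun aux a => aux + 27 ^ (((sN : Int)) - a - 1).toNat * f (PySem.List.pyGetD cs a ' ')) _
      (by
        intro acc x hx
        rw [PySem.List.mem_pyRange_one] at hx
        congr 2
        rw [PySem.List.pyGetD_eq_getElem _ _ hx.1 (by simp; omega),
            PySem.List.pyGetD_eq_getElem _ _ hx.1 (by omega)]
        exact congrArg f (List.getElem_append_left _))]
    rw [ih hm]
    have hlast : PySem.List.pyGetD (cs ++ [c]) (cs.length : Int) ' ' = c := by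
      rw [PySem.List.pyGetD_natCast]
      simp [List.getD]
    rw [hlast, List.foldl_append]
    simp only [List.foldl_cons, List.foldl_nil, List.length_append, List.length_cons,
      List.length_nil]
    have he1 : ((sN : Int) - (cs.length : Int) - 1).toNat = sN - cs.length - 1 := by omega
    have he3 : sN - (cs.length + 1) = sN - cs.length - 1 := by omega
    rw [he1, he3]
    set m1 := sN - cs.length - 1 with hm1
    rw [show sN - cs.length = m1 + 1 from by simp at h; omega, pow_succ]
    ring

-- range with positive step peels its head
theorem pv_pyRange_pos_cons (a b s : Int) (hs : 0 < s) (hab : a < b) :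
    PySem.List.pyRange a b s = a :: PySem.List.pyRange (a + s) b s := by
  rw [PySem.List.pyRange_of_pos a b hs, PySem.List.pyRange_of_pos (a+s) b hs]
  rw [if_pos hab]
  have hq : (b - a + s - 1) / s = (b - a - 1) / s + 1 := by
    have := Int.add_mul_ediv_right (b - a - 1) 1 hs.ne'
    rw [one_mul] at this
    rw [show b - a + s - 1 = b - a - 1 + s by ring, this]
  have hq0 : 0 ≤ (b - a - 1) / s := Int.ediv_nonneg (by omega) (by omega)
  rw [hq, Int.toNat_add hq0 (by omega)]
  norm_num
  rw [List.range_succ_eq_map]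
  refine List.cons_eq_cons.mpr ⟨by simp, ?_⟩
  rw [List.map_map]
  by_cases hb : a + s < b
  · rw [if_pos hb]
    rw [show (b - (a + s) + s - 1) = b - a - 1 by ring]
    apply List.map_congr_left
    intro k _
    simp [Function.comp]
    ring
  · rw [if_neg hb]
    have h0 : (b - a - 1) / s = 0 := Int.ediv_eq_zero_of_lt (by omega) (by omega)
    simp [h0]

theorem pv_pyRange_pos_nil (a b s : Int) (hs : 0 < s) (hab : b ≤ a) :
    PySem.List.pyRange a b s = [] := by
  rw [PySem.List.pyRange_of_pos a b hs]
  simp [if_neg (by omega : ¬ a < b)]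

-- main loop correspondence
theorem pv_main (L : List Char) (s : Int) (hs : 1 ≤ s)
    (fuel : Nat) (j : Int) (acc : List Int) (hj0 : 0 ≤ j) (hjn : j ≤ (L.length : Int))
    (hfuel : ((L.length : Int) - j).toNat < fuel) :
    pvOuterA pvDictA L s fuel j acc
    = (PySem.List.pyRange j (L.length : Int) s).foldl
        (fun acc start =>
          let chunk := PySem.List.slice L (some start) (some (start + s))
          let v := chunk.foldl (fun v c => v * 27 + PySem.Dict.getD pvIdxB c 0) 0
          acc ++ [v * 27 ^ (s - (chunk.length : Int)).toNat]) acc := by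
  induction fuel generalizing j acc with
  | zero => omega
  | succ fuel ih =>
    by_cases hj : j < (L.length : Int)
    · simp only [pvOuterA, if_pos hj]
      have hmin : pvInnerA (L.length : Int) s j j = min (L.length : Int) (j + s) :=
        pv_inner_eq (L.length : Int) s j j (le_of_lt hj) (by omega)
      rw [hmin]
      set n := (L.length : Int) with hn
      set k := min n (j + s) - j with hk
      have hk1 : 1 ≤ k := by omega
      have hks : k ≤ s := by omega
      set chunk := PySem.List.slice L (some j) (some (j + s)) with hchunk
      have hchunkeq : chunk = (L.drop j.toNat).take ((j + s).toNat - j.toNat) :=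
        PySem.List.slice_toNat L hj0 (by omega)
      have hclen : (chunk.length : Int) = k := by
        rw [hchunkeq]; simp; omega
      -- A's aux equals B's chunk value
      have haux :
          (PySem.List.pyRange 0 k 1).foldl
            (fun aux a =>
              aux + 27 ^ (s - a - 1).toNat *
                PySem.Dict.getD pvDictA (PySem.List.pyGetD L (j + a) ' ') 0) 0
          = (chunk.foldl (fun v c => v * 27 + PySem.Dict.getD pvIdxB c 0) 0) *
              27 ^ (s - (chunk.length : Int)).toNat := by
        rw [PySem.List.foldl_congr_mem _ _
          (fun aux a =>
            aux + 27 ^ (s - a - 1).toNat *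
              PySem.Dict.getD pvDictA (PySem.List.pyGetD chunk a ' ') 0) _
          (by
            intro acc' x hx
            rw [PySem.List.mem_pyRange_one] at hx
            congr 3
            rw [PySem.List.pyGetD_eq_getElem _ _ (by omega) (by omega),
                PySem.List.pyGetD_eq_getElem _ _ hx.1 (by omega)]
            apply Option.some.inj
            rw [← List.getElem?_eq_getElem, ← List.getElem?_eq_getElem, hchunkeq,
                List.getElem?_take_of_lt (by omega), List.getElem?_drop]
            congr 1
            omega)]
        have hsum := pv_sum_chunk (fun c => PySem.Dict.getD pvDictA c 0) chunk s.toNat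
          (by omega)
        have hsc : ((s.toNat : Nat) : Int) = s := Int.toNat_of_nonneg (by omega)
        rw [hsc] at hsum
        rw [← hclen, hsum, pv_dict_eq,
            show s.toNat - chunk.length = (s - (chunk.length : Int)).toNat from by omega]
      rw [haux]
      rw [pv_pyRange_pos_cons j n s (by omega) hj]
      rw [List.foldl_cons]
      simp only [← hchunk]
      by_cases hcase : j + s ≤ n
      · rw [show j + s = j + k from by omega]
        exact ih (j + k) _ (by omega) (by omega) (by omega)
      · have hkeq : j + k = n := by omega
        rw [ih (j + k) _ (by omega) (by omega) (by omega)]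
        rw [pv_pyRange_pos_nil (j + k) n s (by omega) (by omega),
            pv_pyRange_pos_nil (j + s) n s (by omega) (by omega)]
    · have hje : j = (L.length : Int) := by omega
      simp only [pvOuterA, if_neg hj]
      rw [pv_pyRange_pos_nil _ _ _ (by omega) (by omega)]
      rfl

-- ===== VERDICT (by name: the statement is the Claim_ definition above) =====
theorem calculate_numerical_equiv_spec : Claim_equal_calculate_numerical_equiv := by
  intro word s _dom pre
  unfold Spec_calculate_numerical_equiv
  obtain ⟨hsz, _hch⟩ := pre
  rcases hsz with hs | ⟨hw, hneg⟩
  · unfold calculate_numerical_equiv calculate_numerical_equiv_alt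
    exact pv_main word.toList s hs (word.toList.length + 1) 0 [] (by omega)
      (by exact_mod_cast Int.natCast_nonneg _) (by omega)
  · subst hw
    unfold calculate_numerical_equiv calculate_numerical_equiv_alt
    simp [pvOuterA, PySem.List.pyRange]
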